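-- pv_equiv track=rewrite | github.com/AndreyZheglov/OSINT | parsers.py | return_pragma
-- ===== SOURCE A (Python) =====
-- def return_pragma(fields: dict) -> dict:
--     pragma = {}
--     additional_list = []
--     for element in fields.values():
--         additional_list.extend(element)
--     additional_list = list(dict.fromkeys(additional_list))
--     if 'id' in additional_list:
--         additional_list.remove('id')
--
--     for key in additional_list:
--         pragma.update({additional_list.index(key) + 1: key})
--
--     return pragma
-- ===== SOURCE B (Python) =====
-- def return_pragma(fields: dict) -> dict:
--     # Single pass: no intermediate deduped list, no dict.fromkeys, no list.index.
--     pragma = {}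
--     seen = set()
--     n = 0
--     for element in fields.values():
--         for value in element:
--             if value != 'id' and value not in seen:
--                 seen.add(value)
--                 n += 1
--                 pragma[n] = value
--     return pragma
-- ===== Notes on version B (the rewrite author's own statement) =====
-- stated objective: faster
-- what changed: Replaces A's flatten-then-dedup-then-remove-then-index pipeline (whose numbering loop rescans the list with list.index for every key) by one streaming pass that numbers each first-seen non-'id' value with a live counter and a seen-set.
import Mathlib
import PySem

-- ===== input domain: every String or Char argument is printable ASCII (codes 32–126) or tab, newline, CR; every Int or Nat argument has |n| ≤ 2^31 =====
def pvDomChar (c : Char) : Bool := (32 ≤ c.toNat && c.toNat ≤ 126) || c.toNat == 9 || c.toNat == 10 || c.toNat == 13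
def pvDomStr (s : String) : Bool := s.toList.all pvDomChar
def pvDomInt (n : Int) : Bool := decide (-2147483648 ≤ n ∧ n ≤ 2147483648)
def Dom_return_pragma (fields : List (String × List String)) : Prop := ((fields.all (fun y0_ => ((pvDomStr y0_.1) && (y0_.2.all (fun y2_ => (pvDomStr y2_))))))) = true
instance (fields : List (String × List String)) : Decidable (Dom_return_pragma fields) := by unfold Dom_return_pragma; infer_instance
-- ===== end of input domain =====

-- B replaces A's flatten → dict.fromkeys dedup → remove('id') → list.index numbering pipeline
-- by a single streaming pass with a seen-set and a live counter, removing the quadratic list.index rescans.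

-- ===== PORT A =====
def return_pragma (fields : List (String × List String)) : List (Int × String) :=
  -- pragma = {}; additional_list = []; for element in fields.values(): additional_list.extend(element)
  let additional0 : List String :=
    (PySem.Dict.ofList fields).values.foldl (fun acc element => acc ++ element) []
  -- additional_list = list(dict.fromkeys(additional_list))
  let additional1 := PySem.List.dedup additional0
  -- if 'id' in additional_list: additional_list.remove('id')  (remove? is some here since 'id' ∈ list)
  let additional2 := if "id" ∈ additional1 then (PySem.List.remove? additional1 "id").getD additional1 else additional1
  -- for key in additional_list: pragma.update({additional_list.index(key) + 1: key})
  -- (list.index never raises here since key ∈ additional_list, so .getD 0 is exact)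
  let pragma : PySem.Dict Int String :=
    additional2.foldl
      (fun d key => d.insert (((PySem.List.index? additional2 key).getD 0 : Nat) + 1 : Int) key)
      PySem.Dict.empty
  pragma.items

-- ===== PORT B =====
def return_pragma_alt (fields : List (String × List String)) : List (Int × String) :=
  let st :=
    (PySem.Dict.ofList fields).values.foldl
      (fun (st : PySem.Dict Int String × PySem.Set String × Int) element =>
        element.foldl
          (fun st value =>
            if value ≠ "id" ∧ ¬ (value ∈ st.2.1) then
              (st.1.insert (st.2.2 + 1) value, PySem.Set.add st.2.1 value, st.2.2 + 1)
            else st)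
          st)
      (PySem.Dict.empty, PySem.Set.empty, 0)
  st.1.items

-- ===== PRECONDITION & SPEC =====
def Spec_return_pragma (fields : List (String × List String)) (out : List (Int × String)) : Prop := out = return_pragma_alt fields
instance (fields : List (String × List String)) (out : List (Int × String)) : Decidable (Spec_return_pragma fields out) := by unfold Spec_return_pragma; infer_instance

-- ===== CLAIM (what is proved, stated in full; the proofs are below) =====
def Claim_equal_return_pragma : Prop := ∀ (fields : List (String × List String)), Dom_return_pragma fields → Spec_return_pragma fields (return_pragma fields)

-- ===== LEMMAS AND PROOFS =====

-- A's foldl-extend is flatten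
theorem pv_foldl_extend (vs : List (List String)) (acc : List String) :
    vs.foldl (fun acc element => acc ++ element) acc = acc ++ vs.flatten := by
  induction vs generalizing acc with
  | nil => simp
  | cons v vs ih => simp [ih]

-- ordered dedup commutes with a filter
theorem pv_ofList_filter (p : String → Bool) (xs : List String) :
    PySem.Set.ofList (xs.filter p) = (PySem.Set.ofList xs).filter p := by
  induction xs using List.reverseRecOn with
  | nil => rfl
  | append_singleton xs x ih =>
      by_cases hp : p x = true
      · rw [List.filter_append, List.filter_singleton]
        simp only [hp, cond_true]
        rw [PySem.Set.ofList_append_singleton, PySem.Set.ofList_append_singleton,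
          PySem.Set.add_eq_ite, PySem.Set.add_eq_ite, ih]
        by_cases hm : x ∈ PySem.Set.ofList xs
        · rw [if_pos hm, if_pos (by simp [List.mem_filter, hm, hp])]
        · rw [if_neg hm, if_neg (by simp [List.mem_filter, hm]), List.filter_append,
            List.filter_singleton]
          simp [hp]
      · rw [List.filter_append, List.filter_singleton]
        simp only [hp, cond_false, List.append_nil]
        rw [PySem.Set.ofList_append_singleton, PySem.Set.add_eq_ite, ih]
        by_cases hm : x ∈ PySem.Set.ofList xs
        · rw [if_pos hm]
        · rw [if_neg hm, List.filter_append, List.filter_singleton]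
          simp [hp]

-- A's list after the 'id' removal is a filter of the dedup
theorem pv_additional2_eq (l : List String) :
    (if "id" ∈ PySem.List.dedup l then (PySem.List.remove? (PySem.List.dedup l) "id").getD (PySem.List.dedup l) else PySem.List.dedup l)
      = (PySem.List.dedup l).filter (fun v => v ≠ "id") := by
  by_cases h : "id" ∈ PySem.List.dedup l
  · rw [if_pos h, PySem.List.remove?_eq_some_erase _ _ h, Option.getD_some,
      List.Nodup.erase_eq_filter (PySem.List.nodup_dedup l)]
    apply List.filter_congr
    intro a _
    by_cases ha : a = "id" <;> simp [ha, bne]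
  · rw [if_neg h, List.filter_eq_self.2]
    intro a ha
    simp only [ne_eq, decide_eq_true_eq]
    exact fun he => h (he ▸ ha)

-- numbering a nodup list by its own index is enumeration
theorem pv_map_index_eq_enumerate (L : List String) (hnd : L.Nodup) (s : Int) :
    L.map (fun a => ((((PySem.List.index? L a).getD 0 : Nat) : Int) + s, a))
      = PySem.List.enumerate L s := by
  induction L generalizing s with
  | nil => rfl
  | cons x xs ih =>
      have hx : x ∉ xs := (List.nodup_cons.1 hnd).1
      rw [List.map_cons, PySem.List.index?_cons_self, PySem.List.enumerate_cons]
      congr 1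
      · simp
      · rw [← ih (List.nodup_cons.1 hnd).2 (s + 1)]
        apply List.map_congr_left
        intro a ha
        have hne : x ≠ a := fun h => hx (h ▸ ha)
        rw [PySem.List.index?_cons_of_ne xs hne]
        obtain ⟨k, hk⟩ := Option.isSome_iff_exists.1 ((PySem.List.index?_isSome_iff xs a).2 ha)
        rw [hk]
        simp only [Option.map_some, Option.getD_some]
        push_cast
        ring_nf

-- A's numbering loop: fresh distinct keys append, giving the enumeration
theorem pv_A_loop (L : List String) (hnd : L.Nodup) :
    (L.foldl (fun (d : PySem.Dict Int String) key =>
        d.insert ((((PySem.List.index? L key).getD 0 : Nat) : Int) + 1) key) PySem.Dict.empty).items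
      = PySem.List.enumerate L 1 := by
  rw [PySem.Dict.items_foldl_insert_fresh L
      (fun key => (((PySem.List.index? L key).getD 0 : Nat) : Int) + 1)
      (fun key => key) PySem.Dict.empty
      (by intro a _; rfl)
      (by
        have h2 : L.map (fun key => (((PySem.List.index? L key).getD 0 : Nat) : Int) + 1)
            = (L.map (fun a => ((((PySem.List.index? L a).getD 0 : Nat) : Int) + 1, a))).map (·.1) := by
          rw [List.map_map]; rfl
        rw [h2, pv_map_index_eq_enumerate L hnd 1, PySem.List.map_fst_enumerate]
        exact PySem.List.nodup_pyRange_one _ _)]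
  have := pv_map_index_eq_enumerate L hnd 1
  simpa [PySem.Dict.empty] using this

-- B's streaming pass over one flat list, from a generic reached state
theorem pv_B_loop (l : List String) (S : PySem.Set String) :
    l.foldl
      (fun (st : PySem.Dict Int String × PySem.Set String × Int) value =>
        if value ≠ "id" ∧ ¬ (value ∈ st.2.1) then
          (st.1.insert (st.2.2 + 1) value, PySem.Set.add st.2.1 value, st.2.2 + 1)
        else st)
      (PySem.Dict.mk (PySem.List.enumerate S 1), S, (S.length : Int))
      = (PySem.Dict.mk (PySem.List.enumerate (PySem.Set.update S (l.filter (fun v => v ≠ "id"))) 1),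
         PySem.Set.update S (l.filter (fun v => v ≠ "id")),
         ((PySem.Set.update S (l.filter (fun v => v ≠ "id"))).length : Int)) := by
  induction l generalizing S with
  | nil => simp [PySem.Set.update_nil]
  | cons v rest ih =>
      rw [List.foldl_cons]
      by_cases hid : v = "id"
      · subst hid
        rw [if_neg (by simp)]
        rw [ih S, List.filter_cons]
        simp
      · by_cases hmem : v ∈ S
        · rw [if_neg (by simp [hmem])]
          rw [ih S, List.filter_cons]
          simp [hid, PySem.Set.update_cons, PySem.Set.add_of_mem hmem]
        · rw [if_pos ⟨hid, hmem⟩]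
          have hc : (PySem.Dict.mk (PySem.List.enumerate S 1)).contains ((S.length : Int) + 1) = false := by
            rw [Bool.eq_false_iff]
            intro hcontains
            have hk := (PySem.Dict.contains_iff_mem_keys _ _).1 hcontains
            simp only [PySem.Dict.keys, PySem.List.map_fst_enumerate] at hk
            rw [PySem.List.mem_pyRange_one] at hk
            omega
          have hins : ((PySem.Dict.mk (PySem.List.enumerate S 1)).insert ((S.length : Int) + 1) v)
              = PySem.Dict.mk (PySem.List.enumerate (S ++ [v]) 1) := by
            apply PySem.Dict.ext
            rw [PySem.Dict.items_insert_of_not_contains _ _ hc, PySem.List.enumerate_append]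
            simp [PySem.List.enumerate_cons]
            omega
          have hlen : ((S.length : Int) + 1) = (((S ++ [v]).length : Nat) : Int) := by
            simp
          have hadd : PySem.Set.add S v = S ++ [v] := PySem.Set.add_of_not_mem hmem
          rw [hins, hadd, hlen, ih (S ++ [v]), List.filter_cons]
          simp [hid, PySem.Set.update_cons, hadd]

-- ===== VERDICT (by name: the statement is the Claim_ definition above) =====
theorem return_pragma_spec : Claim_equal_return_pragma := by
  intro fields _
  unfold Spec_return_pragma return_pragma return_pragma_alt
  simp only [pv_foldl_extend, List.nil_append, List.foldl_flatten.symm]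
  rw [pv_additional2_eq]
  have hnd : ((PySem.List.dedup ((PySem.Dict.ofList fields).values.flatten)).filter (fun v => v ≠ "id")).Nodup :=
    (PySem.List.nodup_dedup _).filter _
  rw [pv_A_loop _ hnd]
  have hB := pv_B_loop ((PySem.Dict.ofList fields).values.flatten) PySem.Set.empty
  have hinit : (PySem.Dict.mk (PySem.List.enumerate (PySem.Set.empty : PySem.Set String) 1),
      (PySem.Set.empty : PySem.Set String), ((PySem.Set.empty : PySem.Set String).length : Int))
      = ((PySem.Dict.empty : PySem.Dict Int String), (PySem.Set.empty : PySem.Set String), (0 : Int)) := rfl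
  rw [hinit] at hB
  rw [hB]
  have hupd : PySem.Set.update PySem.Set.empty
      (((PySem.Dict.ofList fields).values.flatten).filter (fun v => v ≠ "id"))
      = PySem.Set.ofList (((PySem.Dict.ofList fields).values.flatten).filter (fun v => v ≠ "id")) := rfl
  rw [hupd, pv_ofList_filter, PySem.List.dedup_eq_ofList]
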